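-- pv_equiv track=rewrite | github.com/pdynamo/pDynamo3 | pScientific/Graph/Figueras.py | _IdentifyChains
-- ===== SOURCE A (Python) =====
-- def _IdentifyChains ( degree0, node0, currentState, connectivity ):
--     """Identify a single node in each separate chain of order 2 nodes."""
--
--     # . Create a connectivity table for nodes of degree 2.
--     connectivity2 = {}
--     for ( degree, node ) in [ ( degree0, node0 ) ] + currentState:
--         if degree == 2:
--             connections = []
--             for m in connectivity[node]:
--                 if len ( connectivity[m] ) == 2: connections.append ( m )
--             connectivity2[node] = connections
-- #        else:
-- #            break
-- #    print "AA>", connectivity2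
--     # . Get the list of degree 2 nodes.
--     currentOrder2 = [ ]
--     nodes         = list ( connectivity2.keys ( ) )
--     nodes.sort ( )
--     for node in nodes:
--         connections = connectivity2[node]
--
--         # . Save this node if it has no connections.
--         if len ( connections ) == 0: currentOrder2.append ( node )
--         # . Delete the connections for this node.
--         else:
--             for m in connections: connectivity2[m].remove ( node )
--             del connectivity2[node]
--
--     # . Return the nodes.
--     return currentOrder2
-- ===== SOURCE B (Python) =====
-- def _IdentifyChains ( degree0, node0, currentState, connectivity ):
--     """Identify a single node in each separate chain of order 2 nodes."""
--     # . Ascending list of the distinct degree-2 nodes (no connectivity table is stored).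
--     nodes = sorted ( { node for ( degree, node ) in [ ( degree0, node0 ) ] + currentState if degree == 2 } )
--     # . First pass, bottom-up: a node heads its chain exactly when every degree-2 neighbour
--     # . is smaller and none of those neighbours heads the chain itself.
--     kept = {}
--     for node in nodes:
--         kept[node] = all ( ( m < node ) and not kept.get ( m, False )
--                            for m in connectivity[node] if len ( connectivity[m] ) == 2 )
--     # . Second pass: collect the kept nodes in ascending order.
--     return [ node for node in nodes if kept[node] ]
-- ===== Notes on version B (the rewrite author's own statement) =====
-- stated objective: simpler
-- what changed: A builds a degree-2 adjacency dict and destructively peels it (list.remove on every neighbour's list plus del per visited node, appending to the output inside that loop); B stores no adjacency table at all: it takes the sorted set of degree-2 nodes, makes one pass filling a boolean dict kept[n] = (every degree-2 neighbour is smaller and not itself kept), and returns the nodes whose flag is true with a final comprehension.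
-- outside the precondition, e.g. on _IdentifyChains(2, 0, [], {0: [0, 1], 1: [0]}): A returns [], B returns []; on _IdentifyChains(2, 0, [(2, 1)], {0: [1, 1], 1: [0, 0]}): A returns [1], B returns [1]
import Mathlib
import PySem

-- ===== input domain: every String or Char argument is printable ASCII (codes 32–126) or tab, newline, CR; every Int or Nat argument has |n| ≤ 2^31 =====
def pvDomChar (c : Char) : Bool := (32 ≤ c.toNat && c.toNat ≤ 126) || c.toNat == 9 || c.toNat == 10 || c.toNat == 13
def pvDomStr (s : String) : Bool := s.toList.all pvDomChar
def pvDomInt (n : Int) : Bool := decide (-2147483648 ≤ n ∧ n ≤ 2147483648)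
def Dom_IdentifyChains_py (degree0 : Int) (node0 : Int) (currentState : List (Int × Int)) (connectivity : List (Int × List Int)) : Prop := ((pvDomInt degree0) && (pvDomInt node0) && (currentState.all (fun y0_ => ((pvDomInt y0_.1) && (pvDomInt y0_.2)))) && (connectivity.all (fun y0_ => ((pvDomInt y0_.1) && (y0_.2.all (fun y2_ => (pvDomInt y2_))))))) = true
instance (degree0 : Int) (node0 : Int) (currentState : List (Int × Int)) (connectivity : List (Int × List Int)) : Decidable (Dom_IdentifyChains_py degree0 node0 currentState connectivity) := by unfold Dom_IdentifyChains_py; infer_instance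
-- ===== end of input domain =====

-- B stores no adjacency table and never mutates: where A peels a degree-2 dict destructively
-- (paired list.remove + del per node, output built inside that loop), B fills a boolean dict
-- kept[n] over the sorted degree-2 node set and filters it in a final pass; objective: simpler.

-- ===== PORT A =====
-- Literal transliteration of A. Python dict → PySem.Dict; connectivity[x] → getD (the KeyError
-- cases are excluded by Pre_, where the [] default is never reached); list.remove →
-- PySem.List.remove? with identity fallback (exact on Pre_, where the element is present);
-- Python iterates `connections` while `remove` may mutate that same list when node is its own
-- neighbour — exact here on Pre_, which excludes self-loops in the degree-2 table.
def IdentifyChains_py (degree0 : Int) (node0 : Int) (currentState : List (Int × Int)) (connectivity : List (Int × List Int)) : List Int :=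
  let conn : PySem.Dict Int (List Int) := PySem.Dict.mk connectivity
  let connectivity2 : PySem.Dict Int (List Int) :=
    ((degree0, node0) :: currentState).foldl
      (fun d p =>
        if p.1 = 2 then
          d.insert p.2
            ((conn.getD p.2 []).foldl
              (fun connections m =>
                if (conn.getD m []).length = 2 then connections ++ [m] else connections) [])
        else d)
      PySem.Dict.empty
  let nodes : List Int := PySem.List.sorted connectivity2.keys (fun x => x) false
  (nodes.foldl
    (fun (st : List Int × PySem.Dict Int (List Int)) node =>
      let connections := st.2.getD node []
      if connections.length = 0 then (st.1 ++ [node], st.2)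
      else
        (st.1,
         (connections.foldl
            (fun d m => d.modify m [] (fun l => (PySem.List.remove? l node).getD l)) st.2).erase node))
    ([], connectivity2)).1

-- ===== PORT B =====
-- Literal transliteration of Source B: sorted set of degree-2 nodes, a boolean-dict pass
-- (adjacency recomputed inline, nothing stored or mutated), then a filtering comprehension.
def IdentifyChains_py_alt (degree0 : Int) (node0 : Int) (currentState : List (Int × Int)) (connectivity : List (Int × List Int)) : List Int :=
  let conn : PySem.Dict Int (List Int) := PySem.Dict.mk connectivity
  let nodes : List Int :=
    PySem.List.sorted
      (PySem.Set.ofList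
        ((((degree0, node0) :: currentState).filter (fun p => decide (p.1 = 2))).map (fun p => p.2)))
      (fun x => x) false
  let kept : PySem.Dict Int Bool :=
    nodes.foldl
      (fun k node =>
        k.insert node
          (((conn.getD node []).filter (fun m => decide ((conn.getD m []).length = 2))).all
            (fun m => decide (m < node) && !(k.getD m false))))
      PySem.Dict.empty
  nodes.filter (fun node => kept.getD node false)

-- ===== PRECONDITION & SPEC =====
-- pvAdj conn u = the degree-2 neighbour list of a degree-2 node u.
def pvAdj (connectivity : List (Int × List Int)) (u : Int) : List Int :=
  ((PySem.Dict.mk connectivity).getD u []).filter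
    (fun m => decide (((PySem.Dict.mk connectivity).getD m []).length = 2))

-- Pre_ excludes the inputs where A raises (a KeyError while building the table, or a
-- KeyError/ValueError from the paired removes when the degree-2 table is asymmetric or not
-- closed under its own neighbour lists), and the defensible corners where A returns only by
-- accident of in-place list mutation: self-loops in the degree-2 table (A then removes from
-- the very list it is iterating, silently skipping neighbours) and duplicated neighbour entries.
def Pre_IdentifyChains_py (degree0 : Int) (node0 : Int) (currentState : List (Int × Int)) (connectivity : List (Int × List Int)) : Prop :=
  (∀ p ∈ (degree0, node0) :: currentState, p.1 = 2 →
      ((PySem.Dict.mk connectivity).get? p.2).isSome = true ∧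
      ∀ m ∈ (PySem.Dict.mk connectivity).getD p.2 [],
        ((PySem.Dict.mk connectivity).get? m).isSome = true) ∧
  (∀ p ∈ (degree0, node0) :: currentState, p.1 = 2 →
      (pvAdj connectivity p.2).Nodup ∧
      p.2 ∉ pvAdj connectivity p.2 ∧
      ∀ m ∈ pvAdj connectivity p.2,
        ((2 : Int), m) ∈ (degree0, node0) :: currentState ∧ p.2 ∈ pvAdj connectivity m)

instance (degree0 : Int) (node0 : Int) (currentState : List (Int × Int)) (connectivity : List (Int × List Int)) : Decidable (Pre_IdentifyChains_py degree0 node0 currentState connectivity) := by unfold Pre_IdentifyChains_py; infer_instance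

def pvWitness_IdentifyChains_py : Int × Int × (List (Int × Int)) × (List (Int × List Int)) :=
  (2, 0, [(2, 1), (2, 2)], [(0, [1, 5]), (1, [0, 2]), (2, [1, 6]), (5, [0]), (6, [2])])

def Spec_IdentifyChains_py (degree0 : Int) (node0 : Int) (currentState : List (Int × Int)) (connectivity : List (Int × List Int)) (out : List Int) : Prop := out = IdentifyChains_py_alt degree0 node0 currentState connectivity
instance (degree0 : Int) (node0 : Int) (currentState : List (Int × Int)) (connectivity : List (Int × List Int)) (out : List Int) : Decidable (Spec_IdentifyChains_py degree0 node0 currentState connectivity out) := by unfold Spec_IdentifyChains_py; infer_instance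

-- ===== CLAIM (what is proved, stated in full; the proofs are below) =====
def Claim_equal_IdentifyChains_py : Prop := ∀ (degree0 : Int) (node0 : Int) (currentState : List (Int × Int)) (connectivity : List (Int × List Int)), Dom_IdentifyChains_py degree0 node0 currentState connectivity → Pre_IdentifyChains_py degree0 node0 currentState connectivity → Spec_IdentifyChains_py degree0 node0 currentState connectivity (IdentifyChains_py degree0 node0 currentState connectivity)

-- ===== LEMMAS AND PROOFS =====

-- A's second loop, recursively (the pair-state foldl of the port unfolds to this).
def pvALoop (acc : List Int) (d : PySem.Dict Int (List Int)) : List Int → List Int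
  | [] => acc
  | node :: rest =>
    if (d.getD node []).length = 0 then pvALoop (acc ++ [node]) d rest
    else
      pvALoop acc
        (((d.getD node []).foldl
            (fun d m => d.modify m [] (fun l => (PySem.List.remove? l node).getD l)) d).erase node)
        rest

-- The saved-set peeling pass: a proof-only intermediate between PORT A and PORT B.
def pvSLoop (g : Int → List Int) (s : PySem.Set Int) (acc : List Int) : List Int → List Int
  | [] => acc
  | node :: rest =>
    if (g node).all (fun m => decide (m < node) && !(PySem.Set.contains s m))
    then pvSLoop g (PySem.Set.add s node) (acc ++ [node]) rest
    else pvSLoop g s acc rest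

theorem pvALoop_eq_foldl (ns : List Int) : ∀ (acc : List Int) (d : PySem.Dict Int (List Int)),
    (ns.foldl
      (fun (st : List Int × PySem.Dict Int (List Int)) node =>
        let connections := st.2.getD node []
        if connections.length = 0 then (st.1 ++ [node], st.2)
        else
          (st.1,
           (connections.foldl
              (fun d m => d.modify m [] (fun l => (PySem.List.remove? l node).getD l)) st.2).erase node))
      (acc, d)).1 = pvALoop acc d ns := by
  induction ns with
  | nil => intro acc d; rfl
  | cons node rest ih =>
    intro acc d
    rw [List.foldl_cons]
    by_cases h : (d.getD node []).length = 0
    · have hstep : (let connections := (acc, d).2.getD node []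
          if connections.length = 0 then ((acc, d).1 ++ [node], (acc, d).2)
          else
            ((acc, d).1,
             (connections.foldl
                (fun d m => d.modify m [] (fun l => (PySem.List.remove? l node).getD l)) (acc, d).2).erase node))
          = (acc ++ [node], d) := if_pos h
      rw [hstep, ih]
      simp only [pvALoop]
      rw [if_pos h]
    · have hstep : (let connections := (acc, d).2.getD node []
          if connections.length = 0 then ((acc, d).1 ++ [node], (acc, d).2)
          else
            ((acc, d).1,
             (connections.foldl
                (fun d m => d.modify m [] (fun l => (PySem.List.remove? l node).getD l)) (acc, d).2).erase node))
          = (acc,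
             ((d.getD node []).foldl
                (fun d m => d.modify m [] (fun l => (PySem.List.remove? l node).getD l)) d).erase node) := if_neg h
      rw [hstep, ih]
      simp only [pvALoop]
      rw [if_neg h]

theorem pvSLoop_acc (g : Int → List Int) (ns : List Int) :
    ∀ (s : PySem.Set Int) (acc : List Int),
    pvSLoop g s acc ns = acc ++ pvSLoop g s [] ns := by
  induction ns with
  | nil => intro s acc; simp [pvSLoop]
  | cons node rest ih =>
    intro s acc
    simp only [pvSLoop]
    by_cases h : (g node).all (fun m => decide (m < node) && !(PySem.Set.contains s m)) = true
    · rw [if_pos h, if_pos h, ih _ (acc ++ [node]), ih _ ([] ++ [node])]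
      simp
    · rw [if_neg h, if_neg h]
      exact ih _ _

theorem pvGet?_erase_of_ne {ν : Type} (d : PySem.Dict Int ν) (k k' : Int) (h : k' ≠ k) :
    (d.erase k).get? k' = d.get? k' := by
  obtain ⟨items⟩ := d
  simp only [PySem.Dict.erase, PySem.Dict.get?]
  induction items with
  | nil => rfl
  | cons p rest ih =>
    rw [List.filter_cons]
    by_cases hk : p.1 = k
    · rw [if_neg (by simp [hk])]
      rw [List.find?_cons_of_neg (by subst hk; simp; exact fun e => h e.symm)]
      exact ih
    · rw [if_pos (by simp [hk])]
      by_cases hp : p.1 = k'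
      · rw [List.find?_cons_of_pos (by simp [hp]), List.find?_cons_of_pos (by simp [hp])]
      · rw [List.find?_cons_of_neg (by simp [hp]), List.find?_cons_of_neg (by simp [hp])]
        exact ih

theorem pvGetD_erase_of_ne {ν : Type} (d : PySem.Dict Int ν) (k k' : Int) (d0 : ν) (h : k' ≠ k) :
    (d.erase k).getD k' d0 = d.getD k' d0 := by
  simp [PySem.Dict.getD_eq_get?_getD, pvGet?_erase_of_ne d k k' h]

theorem pvGetD_foldl_modify (f : Int → List Int → List Int) (ms : List Int) :
    ∀ (d : PySem.Dict Int (List Int)) (v : Int), ms.Nodup →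
    (ms.foldl (fun d m => d.modify m [] (f m)) d).getD v [] =
      if v ∈ ms then f v (d.getD v []) else d.getD v [] := by
  induction ms with
  | nil => intro d v _; simp
  | cons m rest ih =>
    intro d v hnd
    rcases List.nodup_cons.mp hnd with ⟨hm, hrest⟩
    rw [List.foldl_cons, ih _ _ hrest, PySem.Dict.getD_modify]
    by_cases hv : v ∈ rest
    · have hne : v ≠ m := fun h => hm (h ▸ hv)
      simp [hv, hne]
    · by_cases hvm : v = m
      · subst hvm; simp [hv]
      · simp [hv, hvm]

-- A = the saved-set pass, on any suffix ns of the strictly increasing key list K, provided the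
-- neighbour table g is nodup, self-loop-free, closed and symmetric on K, s never meets ns, and
-- d stores for each v ∈ ns the list g v with the deleted (processed, unsaved) nodes filtered out.
theorem pvLoop_eq (g : Int → List Int) (K : List Int)
    (hK : K.Pairwise (· < ·))
    (hg : ∀ u ∈ K, (g u).Nodup ∧ u ∉ g u ∧ ∀ m ∈ g u, m ∈ K ∧ u ∈ g m) :
    ∀ (ns P : List Int), K = P ++ ns →
    ∀ (d : PySem.Dict Int (List Int)) (s : PySem.Set Int) (acc : List Int),
      (∀ x ∈ s, x ∉ ns) →
      (∀ v ∈ ns, d.getD v [] = (g v).filter (fun m => decide (m ∈ ns) || decide (m ∈ s))) →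
      pvALoop acc d ns = pvSLoop g s acc ns := by
  intro ns
  induction ns with
  | nil => intro P hPK d s acc hs hd; rfl
  | cons node rest ih =>
    intro P hPK d s acc hs hd
    obtain ⟨hP, hns, hcross⟩ := List.pairwise_append.mp (hPK ▸ hK)
    have hrest_gt : ∀ b ∈ rest, node < b := (List.pairwise_cons.mp hns).1
    have hnode_rest : node ∉ rest := fun h => lt_irrefl _ (hrest_gt node h)
    have hnodeK : node ∈ K := by rw [hPK]; simp
    obtain ⟨hnd_g, hself, hclo⟩ := hg node hnodeK
    have hnode_s : node ∉ s := fun h => hs node h List.mem_cons_self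
    have hconns := hd node List.mem_cons_self
    have hpt : ∀ m ∈ g node,
        (¬(m ∈ node :: rest ∨ m ∈ s)) ↔ (m < node ∧ m ∉ s) := by
      intro m hm
      constructor
      · intro h
        push_neg at h
        refine ⟨?_, h.2⟩
        have hmK : m ∈ K := (hclo m hm).1
        have hmP : m ∈ P := by
          rcases List.mem_append.mp (hPK ▸ hmK) with h' | h'
          · exact h'
          · exact absurd h' h.1
        exact hcross m hmP node List.mem_cons_self
      · rintro ⟨hlt, hms⟩
        push_neg
        refine ⟨?_, hms⟩
        intro hmem
        rcases List.mem_cons.mp hmem with rfl | hmr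
        · exact lt_irrefl _ hlt
        · exact lt_irrefl _ (hlt.trans (hrest_gt m hmr))
    have hbr : ((d.getD node []).length = 0) ↔
        ((g node).all (fun m => decide (m < node) && !(PySem.Set.contains s m)) = true) := by
      rw [hconns, List.length_eq_zero_iff, List.filter_eq_nil_iff, List.all_eq_true]
      simp only [Bool.or_eq_true, decide_eq_true_eq, Bool.and_eq_true, Bool.not_eq_true',
        Bool.eq_false_iff, ne_eq, PySem.Set.contains_iff]
      exact forall₂_congr hpt
    simp only [pvALoop, pvSLoop]
    by_cases hsave : (d.getD node []).length = 0
    · rw [if_pos hsave, if_pos (hbr.mp hsave)]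
      refine ih (P ++ [node]) (by rw [hPK]; simp) d (PySem.Set.add s node) (acc ++ [node]) ?_ ?_
      · intro x hx hr
        rcases (PySem.Set.mem_add s node x).mp hx with hxs | rfl
        · exact hs x hxs (List.mem_cons_of_mem _ hr)
        · exact hnode_rest hr
      · intro v hv
        rw [hd v (List.mem_cons_of_mem _ hv)]
        apply List.filter_congr
        intro m _
        rw [← Bool.decide_or, ← Bool.decide_or, decide_eq_decide]
        simp only [List.mem_cons, PySem.Set.mem_add]
        constructor
        · rintro ((rfl | h) | h) <;> tauto
        · rintro (h | (h | rfl)) <;> tauto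
    · rw [if_neg hsave, if_neg ((not_iff_not.mpr hbr).mp hsave)]
      have hconns_nd : (d.getD node []).Nodup := hconns ▸ hnd_g.filter _
      refine ih (P ++ [node]) (by rw [hPK]; simp) _ s acc ?_ ?_
      · intro x hx hr; exact hs x hx (List.mem_cons_of_mem _ hr)
      · intro v hv
        have hvne : v ≠ node := fun h => hnode_rest (h ▸ hv)
        have hvK : v ∈ K := by rw [hPK]; simp [hv]
        obtain ⟨hnd_gv, hself_v, hclo_v⟩ := hg v hvK
        rw [pvGetD_erase_of_ne _ _ _ _ hvne,
            pvGetD_foldl_modify _ _ _ _ hconns_nd,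
            hd v (List.mem_cons_of_mem _ hv)]
        by_cases hvc : v ∈ d.getD node []
        · rw [if_pos hvc]
          have hvgn : v ∈ g node := by
            rw [hconns] at hvc; exact (List.mem_filter.mp hvc).1
          have hngv : node ∈ g v := (hclo v hvgn).2
          have hnode_cur : node ∈ (g v).filter
              (fun m => decide (m ∈ node :: rest) || decide (m ∈ s)) := by
            refine List.mem_filter.mpr ⟨hngv, ?_⟩
            simp [List.mem_cons]
          rw [PySem.List.remove?_eq_some_erase _ _ hnode_cur, Option.getD_some,
              List.Nodup.erase_eq_filter (hnd_gv.filter _) node, List.filter_filter]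
          apply List.filter_congr
          intro m hm
          by_cases h1 : m = node
          · subst h1
            simp [hnode_rest, hnode_s]
          · simp only [List.mem_cons]
            by_cases h2 : m ∈ rest
            · simp [h1, h2]
            · by_cases h3 : m ∈ s <;> simp [h1, h2, h3]
        · rw [if_neg hvc]
          have hngv : node ∉ g v := by
            intro hngv
            apply hvc
            rw [hconns]
            refine List.mem_filter.mpr ⟨(hclo_v node hngv).2, ?_⟩
            simp [hv]
          apply List.filter_congr
          intro m hm
          rw [← Bool.decide_or, ← Bool.decide_or, decide_eq_decide]
          simp only [List.mem_cons]
          have hmne : m ≠ node := fun h => hngv (h ▸ hm)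
          constructor
          · rintro ((rfl | h) | h)
            · exact absurd rfl hmne
            · exact Or.inl h
            · exact Or.inr h
          · rintro (h | h)
            · exact Or.inl (Or.inr h)
            · exact Or.inr h

-- Characterisation of A's table-building fold.
theorem pvFold_get? (A : Int → List Int) (l : List (Int × Int)) :
    ∀ (d : PySem.Dict Int (List Int)) (u : Int),
    (l.foldl (fun d p => if p.1 = 2 then d.insert p.2 (A p.2) else d) d).get? u =
      if ∃ p ∈ l, p.1 = 2 ∧ p.2 = u then some (A u) else d.get? u := by
  induction l with
  | nil => intro d u; simp
  | cons q l ih =>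
    intro d u
    rw [List.foldl_cons]
    by_cases hq : q.1 = 2
    · rw [if_pos hq, ih]
      by_cases hl : ∃ p ∈ l, p.1 = 2 ∧ p.2 = u
      · obtain ⟨p, hp, h2, hu⟩ := hl
        rw [if_pos ⟨p, hp, h2, hu⟩, if_pos ⟨p, List.mem_cons_of_mem _ hp, h2, hu⟩]
      · rw [if_neg hl, PySem.Dict.get?_insert]
        by_cases hu : u = q.2
        · rw [if_pos hu, if_pos ⟨q, List.mem_cons_self, hq, hu.symm⟩, hu]
        · rw [if_neg hu, if_neg ?_]
          rintro ⟨p, hp, h2, hpu⟩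
          rcases List.mem_cons.mp hp with rfl | hp'
          · exact hu hpu.symm
          · exact hl ⟨p, hp', h2, hpu⟩
    · rw [if_neg hq, ih]
      by_cases hl : ∃ p ∈ l, p.1 = 2 ∧ p.2 = u
      · obtain ⟨p, hp, h2, hu⟩ := hl
        rw [if_pos ⟨p, hp, h2, hu⟩, if_pos ⟨p, List.mem_cons_of_mem _ hp, h2, hu⟩]
      · rw [if_neg hl, if_neg ?_]
        rintro ⟨p, hp, h2, hpu⟩
        rcases List.mem_cons.mp hp with rfl | hp'
        · exact hq h2
        · exact hl ⟨p, hp', h2, hpu⟩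

theorem pvFold_keys_nodup (A : Int → List Int) (l : List (Int × Int)) :
    ∀ (d : PySem.Dict Int (List Int)), d.keys.Nodup →
    (l.foldl (fun d p => if p.1 = 2 then d.insert p.2 (A p.2) else d) d).keys.Nodup := by
  induction l with
  | nil => intro d h; exact h
  | cons q l ih =>
    intro d h
    rw [List.foldl_cons]
    by_cases hq : q.1 = 2
    · rw [if_pos hq]; exact ih _ (PySem.Dict.nodup_keys_insert _ _ _ h)
    · rw [if_neg hq]; exact ih _ h

-- The table A builds, named once for the assembly proof.
def pvConn2 (currentState : List (Int × Int)) (connectivity : List (Int × List Int)) (degree0 node0 : Int) : PySem.Dict Int (List Int) :=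
  ((degree0, node0) :: currentState).foldl
    (fun d p => if p.1 = 2 then d.insert p.2 (pvAdj connectivity p.2) else d)
    PySem.Dict.empty

-- A key not inserted by the boolean-dict pass keeps its looked-up value.
theorem pvGetD_foldl_insert_not_mem (f : PySem.Dict Int Bool → Int → Bool) (ns : List Int) :
    ∀ (k : PySem.Dict Int Bool) (n : Int) (d0 : Bool), n ∉ ns →
    (ns.foldl (fun k x => k.insert x (f k x)) k).getD n d0 = k.getD n d0 := by
  induction ns with
  | nil => intro k n d0 _; rfl
  | cons x rest ih =>
    intro k n d0 hn
    rw [List.foldl_cons, ih _ _ _ (fun h => hn (List.mem_cons_of_mem _ h)),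
        PySem.Dict.getD_insert, if_neg (fun h => hn (List.mem_cons.mpr (Or.inl h)))]

-- B's boolean-dict pass + final filter equals the saved-set pass.
theorem pvB_eq_sloop (g : Int → List Int) :
    ∀ (ns : List Int), ns.Nodup →
    ∀ (k : PySem.Dict Int Bool) (s : PySem.Set Int),
      (∀ x ∈ s, x ∉ ns) →
      (∀ m : Int, k.getD m false = true ↔ m ∈ s) →
      ns.filter
        (fun n => (ns.foldl (fun k node => k.insert node ((g node).all
            (fun m => decide (m < node) && !(k.getD m false)))) k).getD n false)
        = pvSLoop g s [] ns := by
  intro ns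
  induction ns with
  | nil => intro _ k s _ _; rfl
  | cons node rest ih =>
    intro hnd k s hs hk
    rcases List.nodup_cons.mp hnd with ⟨hnode_rest, hrest_nd⟩
    have hnode_s : node ∉ s := fun h => hs node h List.mem_cons_self
    -- the flag computed for `node`
    have hb : ((g node).all (fun m => decide (m < node) && !(k.getD m false)))
        = ((g node).all (fun m => decide (m < node) && !(PySem.Set.contains s m))) := by
      apply congrArg
      funext m
      have : k.getD m false = PySem.Set.contains s m := by
        by_cases hm : m ∈ s
        · rw [(hk m).mpr hm, (PySem.Set.contains_iff s m).mpr hm]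
        · cases hkm : k.getD m false
          · cases hcm : PySem.Set.contains s m
            · rfl
            · exact absurd ((PySem.Set.contains_iff s m).mp hcm) hm
          · exact absurd ((hk m).mp hkm) hm
      rw [this]
    set b := (g node).all (fun m => decide (m < node) && !(k.getD m false)) with hbdef
    have hfold : (node :: rest).foldl (fun k node => k.insert node ((g node).all
          (fun m => decide (m < node) && !(k.getD m false)))) k
        = rest.foldl (fun k node => k.insert node ((g node).all
          (fun m => decide (m < node) && !(k.getD m false)))) (k.insert node b) := by
      rw [List.foldl_cons]
    have hval : ((node :: rest).foldl (fun k node => k.insert node ((g node).all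
          (fun m => decide (m < node) && !(k.getD m false)))) k).getD node false = b := by
      rw [hfold, pvGetD_foldl_insert_not_mem _ _ _ _ _ hnode_rest,
          PySem.Dict.getD_insert, if_pos rfl]
    have hs' : ∀ x ∈ (if b then PySem.Set.add s node else s), x ∉ rest := by
      intro x hx
      by_cases hbv : b = true
      · rw [if_pos hbv] at hx
        rcases (PySem.Set.mem_add s node x).mp hx with hxs | rfl
        · exact fun h => hs x hxs (List.mem_cons_of_mem _ h)
        · exact hnode_rest
      · rw [if_neg hbv] at hx
        exact fun h => hs x hx (List.mem_cons_of_mem _ h)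
    have hk' : ∀ m : Int, (k.insert node b).getD m false = true ↔
        m ∈ (if b then PySem.Set.add s node else s) := by
      intro m
      rw [PySem.Dict.getD_insert]
      by_cases hm : m = node
      · subst hm
        rw [if_pos rfl]
        by_cases hbv : b = true
        · rw [if_pos hbv, hbv]
          simp [PySem.Set.mem_add]
        · rw [if_neg hbv]
          exact ⟨fun h => absurd h hbv, fun h => absurd h hnode_s⟩
      · rw [if_neg hm]
        by_cases hbv : b = true
        · rw [if_pos hbv, PySem.Set.mem_add, hk m]
          exact ⟨Or.inl, fun h => h.elim id (fun e => absurd e hm)⟩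
        · rw [if_neg hbv]
          exact hk m
    have hrec := ih hrest_nd (k.insert node b) (if b then PySem.Set.add s node else s) hs' hk'
    simp only [List.filter_cons]
    rw [hval, hfold]
    simp only [pvSLoop]
    rw [← hb]
    cases hbv : b with
    | true =>
      rw [hbv] at hrec
      rw [if_pos rfl, if_pos rfl, pvSLoop_acc]
      simp only [if_pos] at hrec
      rw [hrec]
      simp
    | false =>
      rw [hbv] at hrec
      rw [if_neg (by simp), if_neg (by simp)]
      rw [if_neg (by simp)] at hrec
      exact hrec

-- ===== VERDICT (by name: the statement is the Claim_ definition above) =====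
theorem IdentifyChains_py_spec : Claim_equal_IdentifyChains_py := by
  intro degree0 node0 currentState connectivity _ hpre
  obtain ⟨hpre1, hpre2⟩ := hpre
  show IdentifyChains_py degree0 node0 currentState connectivity
      = IdentifyChains_py_alt degree0 node0 currentState connectivity
  have hAB : (fun (d : PySem.Dict Int (List Int)) (p : Int × Int) =>
        if p.1 = 2 then
          d.insert p.2
            (((PySem.Dict.mk connectivity).getD p.2 []).foldl
              (fun connections m =>
                if ((PySem.Dict.mk connectivity).getD m []).length = 2 then connections ++ [m]
                else connections) [])
        else d) =
      (fun (d : PySem.Dict Int (List Int)) (p : Int × Int) =>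
        if p.1 = 2 then d.insert p.2 (pvAdj connectivity p.2) else d) := by
    funext d p
    by_cases hp : p.1 = 2
    · rw [if_pos hp, if_pos hp, PySem.List.foldl_append_ite_eq_filter
        (fun m => ((PySem.Dict.mk connectivity).getD m []).length = 2), List.nil_append]
      rfl
    · rw [if_neg hp, if_neg hp]
  have hconnA : ((degree0, node0) :: currentState).foldl
      (fun (d : PySem.Dict Int (List Int)) (p : Int × Int) =>
        if p.1 = 2 then
          d.insert p.2
            (((PySem.Dict.mk connectivity).getD p.2 []).foldl
              (fun connections m =>
                if ((PySem.Dict.mk connectivity).getD m []).length = 2 then connections ++ [m]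
                else connections) [])
        else d)
      PySem.Dict.empty = pvConn2 currentState connectivity degree0 node0 := by
    rw [pvConn2, hAB]
  -- facts about the table
  have hkeys : ∀ u : Int, u ∈ PySem.List.sorted (pvConn2 currentState connectivity degree0 node0).keys (fun x => x) false ↔
      ∃ p ∈ (degree0, node0) :: currentState, p.1 = 2 ∧ p.2 = u := by
    intro u
    rw [PySem.List.mem_sorted, ← PySem.Dict.contains_iff_mem_keys,
      PySem.Dict.contains_eq_isSome_get?, pvConn2, pvFold_get?]
    by_cases h : ∃ p ∈ (degree0, node0) :: currentState, p.1 = 2 ∧ p.2 = u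
    · simp only [if_pos h, Option.isSome_some]
      exact iff_of_true trivial h
    · simp only [if_neg h, PySem.Dict.get?_empty, Option.isSome_none]
      exact iff_of_false (by simp) h
  have hgval : ∀ u : Int, (∃ p ∈ (degree0, node0) :: currentState, p.1 = 2 ∧ p.2 = u) →
      (pvConn2 currentState connectivity degree0 node0).getD u [] = pvAdj connectivity u := by
    intro u hu
    rw [PySem.Dict.getD_eq_get?_getD, pvConn2, pvFold_get?, if_pos hu, Option.getD_some]
  have hknd : (pvConn2 currentState connectivity degree0 node0).keys.Nodup := by
    rw [pvConn2]; exact pvFold_keys_nodup _ _ _ PySem.Dict.nodup_keys_empty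
  have hKnd : (PySem.List.sorted (pvConn2 currentState connectivity degree0 node0).keys (fun x => x) false).Nodup :=
    ((PySem.List.sorted_perm (pvConn2 currentState connectivity degree0 node0).keys (fun x => x) false).symm.nodup hknd)
  have hK : (PySem.List.sorted (pvConn2 currentState connectivity degree0 node0).keys (fun x => x) false).Pairwise (· < ·) := by
    have h := (PySem.List.sorted_pairwise (pvConn2 currentState connectivity degree0 node0).keys (fun x => x)).and hKnd
    exact h.imp (fun hc => lt_of_le_of_ne hc.1 hc.2)
  have hg : ∀ u ∈ PySem.List.sorted (pvConn2 currentState connectivity degree0 node0).keys (fun x => x) false,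
      ((pvConn2 currentState connectivity degree0 node0).getD u []).Nodup ∧
      u ∉ (pvConn2 currentState connectivity degree0 node0).getD u [] ∧
      ∀ m ∈ (pvConn2 currentState connectivity degree0 node0).getD u [],
        m ∈ PySem.List.sorted (pvConn2 currentState connectivity degree0 node0).keys (fun x => x) false ∧
        u ∈ (pvConn2 currentState connectivity degree0 node0).getD m [] := by
    intro u hu
    obtain ⟨p, hp, h2, hu2⟩ := (hkeys u).mp hu
    obtain ⟨hnd, hself, hsym⟩ := hpre2 p hp h2
    rw [hu2] at hnd hself hsym
    rw [hgval u ⟨p, hp, h2, hu2⟩]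
    refine ⟨hnd, hself, ?_⟩
    intro m hm
    obtain ⟨hm2, hum⟩ := hsym m hm
    refine ⟨(hkeys m).mpr ⟨(2, m), hm2, rfl, rfl⟩, ?_⟩
    rw [hgval m ⟨(2, m), hm2, rfl, rfl⟩]
    exact hum
  -- B's node list is A's sorted key list
  have hnodesB : PySem.List.sorted
      (PySem.Set.ofList
        ((((degree0, node0) :: currentState).filter (fun p => decide (p.1 = 2))).map (fun p => p.2)))
      (fun x => x) false
      = PySem.List.sorted (pvConn2 currentState connectivity degree0 node0).keys (fun x => x) false := by
    rw [PySem.List.sorted_id_eq_sorted_id_iff_perm]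
    rw [List.perm_ext_iff_of_nodup (PySem.Set.nodup_ofList _) hknd]
    intro u
    rw [PySem.Set.mem_ofList, ← PySem.List.mem_sorted (xs := (pvConn2 currentState connectivity degree0 node0).keys) (key := fun x : Int => x) (rev := false), hkeys u]
    simp only [List.mem_map, List.mem_filter, decide_eq_true_eq]
    constructor
    · rintro ⟨p, ⟨hp, h2⟩, hu⟩; exact ⟨p, hp, h2, hu⟩
    · rintro ⟨p, hp, h2, hu⟩; exact ⟨p, ⟨hp, h2⟩, hu⟩
  -- chain everything together
  have hA : IdentifyChains_py degree0 node0 currentState connectivity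
      = pvALoop [] (pvConn2 currentState connectivity degree0 node0)
          (PySem.List.sorted (pvConn2 currentState connectivity degree0 node0).keys (fun x => x) false) := by
    have h1 : IdentifyChains_py degree0 node0 currentState connectivity
        = pvALoop []
            (((degree0, node0) :: currentState).foldl
              (fun (d : PySem.Dict Int (List Int)) (p : Int × Int) =>
                if p.1 = 2 then
                  d.insert p.2
                    (((PySem.Dict.mk connectivity).getD p.2 []).foldl
                      (fun connections m =>
                        if ((PySem.Dict.mk connectivity).getD m []).length = 2 then connections ++ [m]
                        else connections) [])
                else d)
              PySem.Dict.empty)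
            (PySem.List.sorted ((((degree0, node0) :: currentState).foldl
              (fun (d : PySem.Dict Int (List Int)) (p : Int × Int) =>
                if p.1 = 2 then
                  d.insert p.2
                    (((PySem.Dict.mk connectivity).getD p.2 []).foldl
                      (fun connections m =>
                        if ((PySem.Dict.mk connectivity).getD m []).length = 2 then connections ++ [m]
                        else connections) [])
                else d)
              PySem.Dict.empty)).keys (fun x => x) false) := pvALoop_eq_foldl _ _ _
    rw [hconnA] at h1
    exact h1
  -- B via pvB_eq_sloop with g := the table lookup
  have hgadj : ∀ n ∈ PySem.List.sorted (pvConn2 currentState connectivity degree0 node0).keys (fun x => x) false,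
      ((PySem.Dict.mk connectivity).getD n []).filter
          (fun m => decide (((PySem.Dict.mk connectivity).getD m []).length = 2))
        = (pvConn2 currentState connectivity degree0 node0).getD n [] := by
    intro n hn
    rw [hgval n ((hkeys n).mp hn)]
    rfl
  have hB : IdentifyChains_py_alt degree0 node0 currentState connectivity
      = pvSLoop (fun u => (pvConn2 currentState connectivity degree0 node0).getD u [])
          PySem.Set.empty []
          (PySem.List.sorted (pvConn2 currentState connectivity degree0 node0).keys (fun x => x) false) := by
    show (PySem.List.sorted
        (PySem.Set.ofList
          ((((degree0, node0) :: currentState).filter (fun p => decide (p.1 = 2))).map (fun p => p.2)))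
        (fun x => x) false).filter
        (fun node => ((PySem.List.sorted
          (PySem.Set.ofList
            ((((degree0, node0) :: currentState).filter (fun p => decide (p.1 = 2))).map (fun p => p.2)))
          (fun x => x) false).foldl
          (fun k node =>
            k.insert node
              ((((PySem.Dict.mk connectivity).getD node []).filter
                  (fun m => decide (((PySem.Dict.mk connectivity).getD m []).length = 2))).all
                (fun m => decide (m < node) && !(k.getD m false))))
          PySem.Dict.empty).getD node false) = _
    rw [hnodesB]
    have hstep : ∀ (k : PySem.Dict Int Bool) (node : Int),
        node ∈ PySem.List.sorted (pvConn2 currentState connectivity degree0 node0).keys (fun x => x) false →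
        k.insert node
            ((((PySem.Dict.mk connectivity).getD node []).filter
                (fun m => decide (((PySem.Dict.mk connectivity).getD m []).length = 2))).all
              (fun m => decide (m < node) && !(k.getD m false)))
          = k.insert node
            ((((pvConn2 currentState connectivity degree0 node0).getD node [])).all
              (fun m => decide (m < node) && !(k.getD m false))) := by
      intro k node hn
      rw [hgadj node hn]
    have hfold_congr : (PySem.List.sorted (pvConn2 currentState connectivity degree0 node0).keys (fun x => x) false).foldl
          (fun k node =>
            k.insert node
              ((((PySem.Dict.mk connectivity).getD node []).filter
                  (fun m => decide (((PySem.Dict.mk connectivity).getD m []).length = 2))).all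
                (fun m => decide (m < node) && !(k.getD m false))))
          PySem.Dict.empty
        = (PySem.List.sorted (pvConn2 currentState connectivity degree0 node0).keys (fun x => x) false).foldl
          (fun k node =>
            k.insert node
              ((((pvConn2 currentState connectivity degree0 node0).getD node [])).all
                (fun m => decide (m < node) && !(k.getD m false))))
          PySem.Dict.empty :=
      PySem.List.foldl_congr_mem _ _ _ _ (fun k x hx => hstep k x hx)
    rw [hfold_congr]
    exact pvB_eq_sloop (fun u => (pvConn2 currentState connectivity degree0 node0).getD u [])
      _ hKnd PySem.Dict.empty PySem.Set.empty
      (fun x hx => absurd hx (by simp [PySem.Set.empty]))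
      (fun m => by simp [PySem.Dict.getD_eq_get?_getD, PySem.Dict.get?_empty, PySem.Set.empty])
  rw [hA, hB]
  refine pvLoop_eq _ _ hK hg _ [] rfl _ PySem.Set.empty []
    (fun x hx => absurd hx (by simp [PySem.Set.empty])) ?_
  intro v hv
  symm
  apply List.filter_eq_self.mpr
  intro m hm
  have hmK := ((hg v hv).2.2 m hm).1
  simp only [Bool.or_eq_true, decide_eq_true_eq]
  exact Or.inl hmK
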